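-- pv_equiv track=rewrite | github.com/giuliaschneider/aoc-2024 | days/day25.py | parse_pattern
-- ===== SOURCE A (Python) =====
-- def parse_pattern(pattern, pattern_type="lock"):
--     lines = [line for line in pattern.strip().split("\n") if line]
--     height = len(lines)
--     width = len(lines[0])
--
--     heights = []
--
--     for col in range(width):
--         column_height = 0
--
--         if pattern_type == "lock":
--             for row in range(1, height):
--                 if lines[row][col] == ".":
--                     column_height = row - 1
--                     break
--                 if row == height - 1:
--                     column_height = row - 1
--
--         else:  # key
--             for row in range(height - 2, -1, -1):
--                 if lines[row][col] == ".":
--                     column_height = height - row - 2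
--                     break
--
--         heights.append(column_height)
--
--     return heights
-- ===== SOURCE B (Python) =====
-- def parse_pattern(pattern, pattern_type="lock"):
--     lines = [line for line in pattern.strip().split("\n") if line]
--     height = len(lines)
--     cols = ["".join(line[c] for line in lines) for c in range(len(lines[0]))]
--     if pattern_type == "lock":
--         return [i - 1 if (i := col.find(".", 1)) != -1 else max(height - 2, 0)
--                 for col in cols]
--     return [height - r - 2 if (r := col[:height - 1].rfind(".")) != -1 else 0
--             for col in cols]
-- ===== Notes on version B (the rewrite author's own statement) =====
-- stated objective: alternative
-- what changed: B transposes the grid into per-column strings once and computes each height with a single forward find starting at row 1 (lock) or a backward rfind on the column without its last row (key), replacing A's nested column-major index loops with early exits.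
-- outside the precondition, e.g. on parse_pattern('##\n..\nx', 'lock'): A returns [0, 0], B raises IndexError
import Mathlib
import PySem

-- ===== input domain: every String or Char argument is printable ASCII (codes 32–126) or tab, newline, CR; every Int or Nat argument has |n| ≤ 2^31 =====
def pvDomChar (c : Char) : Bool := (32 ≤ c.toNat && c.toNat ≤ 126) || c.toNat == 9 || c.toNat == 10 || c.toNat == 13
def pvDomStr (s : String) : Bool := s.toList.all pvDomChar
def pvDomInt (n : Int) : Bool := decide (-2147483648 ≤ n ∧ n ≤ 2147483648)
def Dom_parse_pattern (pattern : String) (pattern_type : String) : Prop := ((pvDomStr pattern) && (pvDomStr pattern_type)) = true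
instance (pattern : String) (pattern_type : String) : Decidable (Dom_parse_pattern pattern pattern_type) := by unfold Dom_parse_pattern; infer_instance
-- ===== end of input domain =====

-- B transposes the grid into per-column character lists and computes each height with one
-- find/rfind search per column instead of A's early-exit row-index loops (objective: alternative).

-- lines = [line for line in pattern.strip().split("\n") if line]   (identical first line of both Pythons)
def pvLines (pattern : String) : List (List Char) :=
  (PySem.Chars.splitOn (PySem.Chars.strip pattern.toList) ['\n']).filter (fun l => !l.isEmpty)

-- ===== PORT A =====
-- inner 'for row in range(1, height)' loop of the lock branch, with its break
def lockScan (lines : List (List Char)) (col : Int) (height : Int) : List Int → Int → Int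
  | [], acc => acc
  | row :: rest, acc =>
    if PySem.List.pyGetD (PySem.List.pyGetD lines row []) col ' ' = '.' then row - 1
    else lockScan lines col height rest (if row = height - 1 then row - 1 else acc)

-- inner 'for row in range(height - 2, -1, -1)' loop of the key branch, with its break
def keyScan (lines : List (List Char)) (col : Int) (height : Int) : List Int → Int → Int
  | [], acc => acc
  | row :: rest, acc =>
    if PySem.List.pyGetD (PySem.List.pyGetD lines row []) col ' ' = '.' then height - row - 2
    else keyScan lines col height rest acc

def parse_pattern (pattern : String) (pattern_type : String) : List Int :=
  let lines := pvLines pattern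
  let height : Int := lines.length
  let width : Int := (PySem.List.pyGetD lines 0 []).length   -- lines[0]: in range under Pre_
  (PySem.List.pyRange 0 width 1).foldl
    (fun heights col =>
      heights ++ [if pattern_type == "lock"
        then lockScan lines col height (PySem.List.pyRange 1 height 1) 0
        else keyScan lines col height (PySem.List.pyRange (height - 2) (-1) (-1)) 0]) []

-- ===== PORT B =====
def parse_pattern_alt (pattern : String) (pattern_type : String) : List Int :=
  let lines := pvLines pattern
  let height : Int := lines.length
  -- cols = ["".join(line[c] for line in lines) for c in range(len(lines[0]))]; line[c] in range under Pre_
  let cols := (PySem.List.pyRange 0 ((PySem.List.pyGetD lines 0 []).length : Int) 1).map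
    (fun c => lines.map (fun line => PySem.List.pyGetD line c ' '))
  if pattern_type == "lock" then
    cols.map (fun col =>
      let i := PySem.Chars.findFrom col ['.'] 1 none
      if i ≠ -1 then i - 1 else max (height - 2) 0)
  else
    cols.map (fun col =>
      let r := PySem.Chars.rfind (PySem.List.slice col none (some (height - 1))) ['.']
      if r ≠ -1 then height - r - 2 else 0)

-- ===== PRECONDITION & SPEC =====
-- Pre_ excludes inputs where A raises IndexError (no nonempty line left after strip/split, so
-- lines[0] fails), and ragged grids with a line shorter than the first line: on those A raises
-- on most inputs and returns only when every column happens to break early, while B's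
-- transpose indexes every line and raises IndexError.
def Pre_parse_pattern (pattern : String) (pattern_type : String) : Prop :=
  pvLines pattern ≠ [] ∧
  ∀ l ∈ pvLines pattern, (PySem.List.pyGetD (pvLines pattern) 0 []).length ≤ l.length
instance (pattern : String) (pattern_type : String) : Decidable (Pre_parse_pattern pattern pattern_type) := by
  unfold Pre_parse_pattern; infer_instance

def pvWitness_parse_pattern : String × String := ("#.#\n###\n..#", "key")

def Spec_parse_pattern (pattern : String) (pattern_type : String) (out : List Int) : Prop := out = parse_pattern_alt pattern pattern_type
instance (pattern : String) (pattern_type : String) (out : List Int) : Decidable (Spec_parse_pattern pattern pattern_type out) := by unfold Spec_parse_pattern; infer_instance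

-- ===== CLAIM (what is proved, stated in full; the proofs are below) =====
def Claim_equal_parse_pattern : Prop := ∀ (pattern : String) (pattern_type : String), Dom_parse_pattern pattern pattern_type → Pre_parse_pattern pattern pattern_type → Spec_parse_pattern pattern pattern_type (parse_pattern pattern pattern_type)

-- ===== LEMMAS AND PROOFS =====

theorem pyGetD_nil_char (col : Int) : PySem.List.pyGetD ([] : List Char) col ' ' = ' ' := by
  simp [PySem.List.pyGetD, PySem.List.pyGet?]

-- the character A's inner loops read at (row, col) is entry row of B's column col
theorem read_eq_col (lines : List (List Char)) (col row : Int) :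
    PySem.List.pyGetD (PySem.List.pyGetD lines row []) col ' '
      = PySem.List.pyGetD (lines.map (fun line => PySem.List.pyGetD line col ' ')) row ' ' := by
  have := PySem.List.pyGetD_map (fun line => PySem.List.pyGetD line col ' ') lines row []
  rw [pyGetD_nil_char] at this
  exact this.symm

theorem prefix_singleton_cons (c a : Char) (t : List Char) :
    [c].isPrefixOf (a :: t) = (c == a) := by
  show (c == a && [].isPrefixOf t) = (c == a)
  simp

theorem findGo_cons (sub : List Char) (a : Char) (t : List Char) (k : Nat) :
    PySem.Chars.find.go sub (a :: t) k
      = if sub.isPrefixOf (a :: t) then (k : Int) else PySem.Chars.find.go sub t (k + 1) := rfl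

theorem findGo_nonneg (sub : List Char) (l : List Char) (k : Nat) :
    PySem.Chars.find.go sub l k = -1 ∨ (k : Int) ≤ PySem.Chars.find.go sub l k := by
  induction l generalizing k with
  | nil =>
    by_cases h : sub.isEmpty <;> simp [PySem.Chars.find.go, h]
  | cons a t ih =>
    rw [findGo_cons]
    by_cases h : sub.isPrefixOf (a :: t) = true
    · right; rw [if_pos h]
    · rw [if_neg h]
      rcases ih (k + 1) with h1 | h1 <;> [left; right] <;> push_cast at * <;> omega

theorem findGo_shift (sub : List Char) (l : List Char) (k : Nat) :
    PySem.Chars.find.go sub l k =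
      if PySem.Chars.find.go sub l 0 = -1 then -1
      else (k : Int) + PySem.Chars.find.go sub l 0 := by
  induction l generalizing k with
  | nil =>
    by_cases h : sub.isEmpty <;> simp [PySem.Chars.find.go, h]
  | cons a t ih =>
    rw [findGo_cons, findGo_cons]
    by_cases h : sub.isPrefixOf (a :: t) = true
    · simp [h]
    · rw [if_neg h, if_neg h]
      have h1 := ih (k + 1)
      have h0 := ih 1
      have hn := findGo_nonneg sub t 0
      push_cast at h1 h0 ⊢
      split_ifs at h1 h0 ⊢ with p q <;> omega

theorem rfindGo_succ (s : List Char) (j : Nat) :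
    PySem.Chars.rfind.go s ['.'] (j + 1)
      = if ['.'].isPrefixOf (s.drop (j + 1)) then ((j + 1 : Nat) : Int)
        else PySem.Chars.rfind.go s ['.'] j := rfl

theorem rfindGo_zero (s : List Char) :
    PySem.Chars.rfind.go s ['.'] 0 = if ['.'].isPrefixOf s then (0 : Int) else -1 := rfl

-- A's lock loop on rows j..height-1 is find.go on the column suffix
theorem lockScan_eq_findGo (lines : List (List Char)) (col : Int) (cs : List Char)
    (hcs : cs = lines.map (fun line => PySem.List.pyGetD line col ' '))
    (n : Nat) :
    ∀ (j : Nat), 1 ≤ j → j ≤ lines.length → n = lines.length - j → ∀ (acc : Int),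
    lockScan lines col lines.length (PySem.List.pyRange j lines.length 1) acc =
      (if PySem.Chars.find.go ['.'] (cs.drop j) j = -1
       then (if (j : Int) < lines.length then (lines.length : Int) - 2 else acc)
       else PySem.Chars.find.go ['.'] (cs.drop j) j - 1) := by
  have hlen : cs.length = lines.length := by simp [hcs]
  induction n with
  | zero =>
    intro j hj hjh hn acc
    have hj' : j = lines.length := by omega
    subst hj'
    rw [PySem.List.pyRange_one_eq_nil (le_refl _)]
    rw [List.drop_eq_nil_of_le (by omega)]
    simp [lockScan, PySem.Chars.find.go]
  | succ n ih =>
    intro j hj hjh hn acc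
    have hjlt : j < lines.length := by omega
    rw [PySem.List.pyRange_one_cons (by exact_mod_cast hjlt)]
    have hget : cs.drop j = cs[j]'(by omega) :: cs.drop (j + 1) :=
      List.drop_eq_getElem_cons (by omega)
    have hread : PySem.List.pyGetD (PySem.List.pyGetD lines (j : Int) []) col ' ' = cs[j]'(by omega) := by
      rw [read_eq_col, ← hcs, PySem.List.pyGetD_natCast, List.getD_eq_getElem?_getD,
        List.getElem?_eq_getElem (by omega)]
      rfl
    simp only [lockScan, hread]
    by_cases hdot : cs[j]'(by omega) = '.'
    · have hr : PySem.Chars.find.go ['.'] (cs.drop j) j = (j : Int) := by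
        rw [hget, findGo_cons, prefix_singleton_cons, if_pos (by simp [hdot])]
      rw [if_pos hdot, hr, if_neg (show ¬ ((j : Int) = -1) by omega)]
    · have hr : PySem.Chars.find.go ['.'] (cs.drop j) j
          = PySem.Chars.find.go ['.'] (cs.drop (j + 1)) (j + 1) := by
        rw [hget, findGo_cons, prefix_singleton_cons,
          if_neg (by simp only [beq_iff_eq]; exact fun h => hdot h.symm)]
      rw [if_neg hdot]
      rw [show ((j : Int) + 1) = ((j + 1 : Nat) : Int) by push_cast; ring]
      rw [ih (j + 1) (by omega) (by omega) (by omega) _, hr]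
      have hg := findGo_nonneg ['.'] (cs.drop (j + 1)) (j + 1)
      split_ifs <;> push_cast at * <;> omega

-- A's key loop on rows m-1…0 is rfind.go on the column without its last row
theorem keyScan_eq_rfindGo (lines : List (List Char)) (col : Int) (cs : List Char)
    (hcs : cs = lines.map (fun line => PySem.List.pyGetD line col ' '))
    (m : Nat) :
    ∀ (acc : Int), m + 1 ≤ lines.length →
    keyScan lines col lines.length (PySem.List.pyRange ((m : Int) - 1) (-1) (-1)) acc =
      (if m = 0 then acc
       else if PySem.Chars.rfind.go (cs.take (lines.length - 1)) ['.'] (m - 1) = -1 then acc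
       else (lines.length : Int) - PySem.Chars.rfind.go (cs.take (lines.length - 1)) ['.'] (m - 1) - 2) := by
  have hlen : cs.length = lines.length := by simp [hcs]
  induction m with
  | zero =>
    intro acc _
    rw [show ((0 : Nat) : Int) - 1 = -1 by norm_num, PySem.List.pyRange_neg_one_eq_nil (le_refl _)]
    simp [keyScan]
  | succ m ih =>
    intro acc hm
    have hmlt : m < lines.length - 1 := by omega
    have htlen : (cs.take (lines.length - 1)).length = lines.length - 1 := by
      rw [List.length_take]; omega
    have hcons : PySem.List.pyRange (((m + 1 : Nat) : Int) - 1) (-1) (-1)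
        = ((m : Nat) : Int) :: PySem.List.pyRange ((m : Int) - 1) (-1) (-1) := by
      rw [show (((m + 1 : Nat) : Int) - 1) = ((m : Nat) : Int) by push_cast; ring]
      exact PySem.List.pyRange_neg_one_cons (by push_cast; omega)
    have hget : (cs.take (lines.length - 1)).drop m
        = (cs.take (lines.length - 1))[m]'(by omega) :: (cs.take (lines.length - 1)).drop (m + 1) :=
      List.drop_eq_getElem_cons (by omega)
    have hread : PySem.List.pyGetD (PySem.List.pyGetD lines ((m : Nat) : Int) []) col ' '
        = (cs.take (lines.length - 1))[m]'(by omega) := by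
      rw [read_eq_col, ← hcs, PySem.List.pyGetD_natCast, List.getD_eq_getElem?_getD,
        List.getElem?_eq_getElem (by omega)]
      simp [List.getElem_take]
    rw [hcons]
    simp only [keyScan, hread]
    by_cases hdot : (cs.take (lines.length - 1))[m]'(by omega) = '.'
    · rw [if_pos hdot]
      have hr : PySem.Chars.rfind.go (cs.take (lines.length - 1)) ['.'] m = (m : Int) := by
        cases m with
        | zero =>
          rw [rfindGo_zero]
          have h0 : 0 < (cs.take (lines.length - 1)).length := by omega
          rw [show cs.take (lines.length - 1)
              = (cs.take (lines.length - 1))[0]'h0 :: (cs.take (lines.length - 1)).drop 1 from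
            by simpa using List.drop_eq_getElem_cons h0]
          rw [prefix_singleton_cons, if_pos (by simp [hdot])]
          norm_num
        | succ k =>
          rw [rfindGo_succ, hget, prefix_singleton_cons, if_pos (by simp [hdot])]
      simp only [Nat.succ_ne_zero, if_false, Nat.add_sub_cancel, hr]
      rw [if_neg (show ¬ ((m : Int) = -1) by omega)]
    · rw [if_neg hdot, ih acc (by omega)]
      have hr : PySem.Chars.rfind.go (cs.take (lines.length - 1)) ['.'] m
          = if m = 0 then -1 else PySem.Chars.rfind.go (cs.take (lines.length - 1)) ['.'] (m - 1) := by
        cases m with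
        | zero =>
          rw [rfindGo_zero]
          have h0 : 0 < (cs.take (lines.length - 1)).length := by omega
          rw [show cs.take (lines.length - 1)
              = (cs.take (lines.length - 1))[0]'h0 :: (cs.take (lines.length - 1)).drop 1 from
            by simpa using List.drop_eq_getElem_cons h0]
          rw [prefix_singleton_cons,
            if_neg (by simp only [beq_iff_eq]; exact fun h => hdot h.symm)]
          simp
        | succ k =>
          rw [rfindGo_succ, hget, prefix_singleton_cons,
            if_neg (by simp only [beq_iff_eq]; exact fun h => hdot h.symm)]
          simp
      simp only [Nat.succ_ne_zero, if_false, Nat.add_sub_cancel, hr]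
      cases m with
      | zero => simp
      | succ k => simp

-- per-column agreement, lock branch
theorem lock_col_eq (lines : List (List Char)) (col : Int) (hne : lines ≠ []) :
    lockScan lines col lines.length (PySem.List.pyRange 1 lines.length 1) 0 =
      (let csl := lines.map (fun line => PySem.List.pyGetD line col ' ')
       let i := PySem.Chars.findFrom csl ['.'] 1 none
       if i ≠ -1 then i - 1 else max ((lines.length : Int) - 2) 0) := by
  have hpos : 1 ≤ lines.length := by
    cases lines with | nil => simp at hne | cons a t => simp
  have hlen : (lines.map (fun line => PySem.List.pyGetD line col ' ')).length = lines.length := by simp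
  have hA := lockScan_eq_findGo lines col _ rfl (lines.length - 1) 1 (by omega) (by omega) rfl 0
  have hFF := PySem.Chars.findFrom_natCast
    (lines.map (fun line => PySem.List.pyGetD line col ' ')) ['.'] 1 (by omega)
  rw [show ((1 : Nat) : Int) = (1 : Int) by rfl] at hA hFF
  rw [hA]
  simp only [hFF, PySem.Chars.find]
  have hsh := findGo_shift ['.'] ((lines.map (fun line => PySem.List.pyGetD line col ' ')).drop 1) 1
  have hg0 := findGo_nonneg ['.'] ((lines.map (fun line => PySem.List.pyGetD line col ' ')).drop 1) 0
  rw [show ((1 : Nat) : Int) = (1 : Int) by rfl] at hsh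
  rw [hsh]
  split_ifs <;> push_cast at * <;> omega

-- per-column agreement, key branch
theorem key_col_eq (lines : List (List Char)) (col : Int) (hne : lines ≠ []) :
    keyScan lines col lines.length (PySem.List.pyRange ((lines.length : Int) - 2) (-1) (-1)) 0 =
      (let csl := lines.map (fun line => PySem.List.pyGetD line col ' ')
       let r := PySem.Chars.rfind (PySem.List.slice csl none (some ((lines.length : Int) - 1))) ['.']
       if r ≠ -1 then (lines.length : Int) - r - 2 else 0) := by
  have hpos : 1 ≤ lines.length := by
    cases lines with | nil => simp at hne | cons a t => simp
  have hlen : (lines.map (fun line => PySem.List.pyGetD line col ' ')).length = lines.length := by simp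
  have hslice : PySem.List.slice (lines.map (fun line => PySem.List.pyGetD line col ' ')) none
      (some ((lines.length : Int) - 1))
      = (lines.map (fun line => PySem.List.pyGetD line col ' ')).take (lines.length - 1) := by
    rw [show ((lines.length : Int) - 1) = ((lines.length - 1 : Nat) : Int) by push_cast [hpos]; omega]
    exact PySem.List.slice_to_natCast _ _
  have htlen : ((lines.map (fun line => PySem.List.pyGetD line col ' ')).take (lines.length - 1)).length
      = lines.length - 1 := by
    rw [List.length_take]; omega
  have hrf : PySem.Chars.rfind
      ((lines.map (fun line => PySem.List.pyGetD line col ' ')).take (lines.length - 1)) ['.']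
      = PySem.Chars.rfind.go
        ((lines.map (fun line => PySem.List.pyGetD line col ' ')).take (lines.length - 1)) ['.']
        (lines.length - 1) := by
    rw [PySem.Chars.rfind, htlen]
  simp only [hslice, hrf]
  rcases Nat.lt_or_ge lines.length 2 with h2 | h2
  · -- height 1: empty loop on both sides
    have h1 : lines.length = 1 := by omega
    rw [show ((lines.length : Int) - 2) = -1 by rw [h1]; norm_num,
      PySem.List.pyRange_neg_one_eq_nil (by norm_num)]
    simp only [keyScan]
    rw [h1]
    simp [rfindGo_zero, List.isPrefixOf]
  · -- height ≥ 2
    have hA := keyScan_eq_rfindGo lines col _ rfl (lines.length - 1) 0 (by omega)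
    rw [show (((lines.length - 1 : Nat)) : Int) - 1 = (lines.length : Int) - 2 by push_cast [hpos]; omega] at hA
    rw [hA, if_neg (by omega)]
    -- index length-1 is past the truncated column, so rfind.go steps down once
    have hstep : PySem.Chars.rfind.go
        ((lines.map (fun line => PySem.List.pyGetD line col ' ')).take (lines.length - 1)) ['.']
        (lines.length - 1)
        = PySem.Chars.rfind.go
          ((lines.map (fun line => PySem.List.pyGetD line col ' ')).take (lines.length - 1)) ['.']
          (lines.length - 2) := by
      rw [show lines.length - 1 = (lines.length - 2) + 1 by omega, rfindGo_succ]
      rw [if_neg (by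
        rw [List.drop_eq_nil_of_le (List.length_take_le _ _)]
        simp [List.isPrefixOf])]
    rw [hstep, show lines.length - 1 - 1 = lines.length - 2 by omega]
    split_ifs with p q <;> simp_all

set_option maxHeartbeats 1000000 in
theorem parse_pattern_eq (pattern : String) (pattern_type : String)
    (hne : pvLines pattern ≠ []) :
    parse_pattern pattern pattern_type = parse_pattern_alt pattern pattern_type := by
  unfold parse_pattern parse_pattern_alt
  simp only [PySem.List.foldl_append_singleton_eq_map, List.nil_append, List.map_map]
  by_cases h : pattern_type == "lock"
  · simp only [h, if_pos]
    apply List.map_congr_left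
    intro col _
    exact (lock_col_eq (pvLines pattern) col hne)
  · simp only [h, Bool.false_eq_true, if_false]
    apply List.map_congr_left
    intro col _
    exact (key_col_eq (pvLines pattern) col hne)

-- ===== VERDICT (by name: the statement is the Claim_ definition above) =====
theorem parse_pattern_spec : Claim_equal_parse_pattern := by
  intro pattern pattern_type _ hpre
  unfold Spec_parse_pattern
  exact parse_pattern_eq pattern pattern_type hpre.1
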